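-- pv_equiv track=rewrite | github.com/BestPotatis/DeepLearningProtein | accuracy_b5.py | type_from_labels
-- ===== SOURCE A (Python) =====
-- def type_from_labels(label):
--     """
--     Function that determines the protein type from labels
--
--     Dimension of each label:
--     (len_of_longenst_protein_in_batch)
--
--     # Residue class
--     0 = inside cell/cytosol (I)
--     1 = Outside cell/lumen of ER/Golgi/lysosomes (O)
--     2 = beta membrane (B)
--     3 = signal peptide (S)
--     4 = alpha membrane (M)
--     5 = periplasm (P)
--
--     B in the label sequence -> beta
--     I only -> globular
--     Both S and M -> SP + alpha(TM)
--     M -> alpha(TM)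
--     S -> signal peptide
--
--     # Protein type class
--     0 = TM
--     1 = SP + TM
--     2 = SP
--     3 = GLOBULAR
--     4 = BETA
--     """
--
--     if 2 in label:
--         ptype = 4
--
--     elif all(element == 0 for element in label):
--         ptype = 3
--
--     elif 3 in label and 4 in label:
--         ptype = 1
--
--     elif 3 in label:
--        ptype = 2
--
--     elif 4 in label:
--         ptype = 0
--
--     elif all(x == 0 or x == -1 for x in label):
--         ptype = 3
--
--     else:
--         ptype = None
--
--     return ptype
-- ===== SOURCE B (Python) =====
-- def type_from_labels(label):
--     # One pass: accumulate flags, then the same priority cascade.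
--     has2 = has3 = has4 = False
--     all_zero = all_zero_or_neg1 = True
--     for x in label:
--         if x == 2:
--             has2 = True
--         elif x == 3:
--             has3 = True
--         elif x == 4:
--             has4 = True
--         if x != 0:
--             all_zero = False
--             if x != -1:
--                 all_zero_or_neg1 = False
--     if has2:
--         return 4
--     elif all_zero:
--         return 3
--     elif has3 and has4:
--         return 1
--     elif has3:
--         return 2
--     elif has4:
--         return 0
--     elif all_zero_or_neg1:
--         return 3
--     else:
--         return None
-- ===== Notes on version B (the rewrite author's own statement) =====
-- stated objective: simpler
-- what changed: Replaces up to five independent scans of the label list (two membership tests, two all() scans, repeated '3 in'/'4 in') with a single pass that accumulates five boolean flags, followed by the same priority cascade.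
import Mathlib
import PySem

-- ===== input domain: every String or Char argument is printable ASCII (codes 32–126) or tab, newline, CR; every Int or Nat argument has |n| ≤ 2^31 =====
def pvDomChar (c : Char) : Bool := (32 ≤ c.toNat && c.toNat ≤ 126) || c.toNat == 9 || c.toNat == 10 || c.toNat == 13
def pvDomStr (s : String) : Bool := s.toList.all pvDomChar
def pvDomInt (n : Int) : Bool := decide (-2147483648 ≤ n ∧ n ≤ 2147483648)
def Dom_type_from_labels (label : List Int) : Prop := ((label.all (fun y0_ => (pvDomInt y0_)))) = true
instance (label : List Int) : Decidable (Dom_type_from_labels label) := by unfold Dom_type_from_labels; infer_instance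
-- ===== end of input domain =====

-- B replaces A's several independent scans of the list by one pass accumulating five flags (simpler).

-- ===== PORT A =====
def type_from_labels (label : List Int) : Option Int :=
  if 2 ∈ label then some 4
  else if label.all (fun element => element == 0) then some 3
  else if 3 ∈ label ∧ 4 ∈ label then some 1
  else if 3 ∈ label then some 2
  else if 4 ∈ label then some 0
  else if label.all (fun x => x == 0 || x == -1) then some 3
  else none

-- ===== PORT B =====
def tflAltStep (st : Bool × Bool × Bool × Bool × Bool) (x : Int) :
    Bool × Bool × Bool × Bool × Bool :=
  let (h2, h3, h4, az, azn) := st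
  let h2 := if x == 2 then true else h2
  let h3 := if !(x == 2) && x == 3 then true else h3
  let h4 := if !(x == 2) && !(x == 3) && x == 4 then true else h4
  if x != 0 then
    (h2, h3, h4, false, if x != -1 then false else azn)
  else
    (h2, h3, h4, az, azn)

def type_from_labels_alt (label : List Int) : Option Int :=
  let st := label.foldl tflAltStep (false, false, false, true, true)
  let (h2, h3, h4, az, azn) := st
  if h2 then some 4
  else if az then some 3
  else if h3 && h4 then some 1
  else if h3 then some 2
  else if h4 then some 0
  else if azn then some 3
  else none

-- ===== PRECONDITION & SPEC =====
def Spec_type_from_labels (label : List Int) (out : Option Int) : Prop := out = type_from_labels_alt label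
instance (label : List Int) (out : Option Int) : Decidable (Spec_type_from_labels label out) := by unfold Spec_type_from_labels; infer_instance

-- ===== CLAIM (what is proved, stated in full; the proofs are below) =====
def Claim_equal_type_from_labels : Prop := ∀ (label : List Int), Dom_type_from_labels label → Spec_type_from_labels label (type_from_labels label)

-- ===== LEMMAS AND PROOFS =====

theorem tflAltStep_eq (h2 h3 h4 az azn : Bool) (x : Int) :
    tflAltStep (h2, h3, h4, az, azn) x =
      (h2 || x == 2, h3 || x == 3, h4 || x == 4, az && x == 0, azn && (x == 0 || x == -1)) := by
  unfold tflAltStep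
  by_cases hx2 : x = 2 <;> by_cases hx3 : x = 3 <;> by_cases hx4 : x = 4 <;>
    by_cases hx0 : x = 0 <;> by_cases hxn : x = -1 <;> simp_all

theorem tfl_foldl_spec (l : List Int) (h2 h3 h4 az azn : Bool) :
    l.foldl tflAltStep (h2, h3, h4, az, azn) =
      (h2 || l.contains 2, h3 || l.contains 3, h4 || l.contains 4,
       az && l.all (fun x => x == 0), azn && l.all (fun x => x == 0 || x == -1)) := by
  induction l generalizing h2 h3 h4 az azn with
  | nil => simp
  | cons a t ih =>
    rw [List.foldl_cons, tflAltStep_eq, ih]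
    simp [Bool.or_assoc, Bool.and_assoc, beq_eq_decide, eq_comm]

theorem type_from_labels_eq (label : List Int) :
    type_from_labels label = type_from_labels_alt label := by
  unfold type_from_labels type_from_labels_alt
  rw [tfl_foldl_spec]
  simp only [Bool.false_or, Bool.true_and]
  by_cases c2 : 2 ∈ label <;> by_cases c3 : 3 ∈ label <;> by_cases c4 : 4 ∈ label <;>
    simp_all [List.contains_eq_mem]

-- ===== VERDICT (by name: the statement is the Claim_ definition above) =====
theorem type_from_labels_spec : Claim_equal_type_from_labels := by
  intro label _
  exact type_from_labels_eq label
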